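-- pv_equiv track=rewrite | github.com/tjd1234/cmpt120fall2024 | lectures/lecture30/spellcheck_lecture.py | get_misspelled
-- ===== SOURCE A (Python) =====
-- def get_misspelled(line, word_dict):
--     """Returns a list of all the words in line that are misspelled.
--
--     A word is considered misspelled if it has more than one character and also
--     doesn't appear as a key in word_dict.
--
--     If the same misspelled word appears more than once, then it only appears
--     once in the returned list.
--
--     >>> words = read_words('words.txt')
--     >>> get_misspelled('I like a glove and socks', words)
--     ['and', 'like']
--     """
--     # store the words in a dictionary to remove duplicates
--     misspelled = {}
--     for w in line.split():
--         if len(w) > 1 and w not in word_dict: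
--             misspelled[w] = 1
--
--     # convert the dictionary to a list
--     unique_words = list(misspelled.keys())
--     unique_words.sort()
--     return unique_words
-- ===== SOURCE B (Python) =====
-- def _insert_sorted_unique(res, w):
--     """Return res with w inserted at its sorted position, unchanged if already there."""
--     if not res:
--         return [w]
--     h = res[0]
--     if h < w:
--         return [h] + _insert_sorted_unique(res[1:], w)
--     if h == w:
--         return res
--     return [w] + res
--
--
-- def get_misspelled(line, word_dict):
--     """Online insertion: keep a sorted duplicate-free list while scanning the words."""
--     result = []
--     for w in line.split():
--         if len(w) > 1 and w not in word_dict: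
--             result = _insert_sorted_unique(result, w)
--     return result
-- ===== Notes on version B (the rewrite author's own statement) =====
-- stated objective: alternative
-- what changed: B never builds a dict and never calls sort: while scanning the words it maintains a sorted duplicate-free result list online, inserting each qualifying word at its ordered position (or skipping it if already present) via a recursive sorted-insert.
import Mathlib
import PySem

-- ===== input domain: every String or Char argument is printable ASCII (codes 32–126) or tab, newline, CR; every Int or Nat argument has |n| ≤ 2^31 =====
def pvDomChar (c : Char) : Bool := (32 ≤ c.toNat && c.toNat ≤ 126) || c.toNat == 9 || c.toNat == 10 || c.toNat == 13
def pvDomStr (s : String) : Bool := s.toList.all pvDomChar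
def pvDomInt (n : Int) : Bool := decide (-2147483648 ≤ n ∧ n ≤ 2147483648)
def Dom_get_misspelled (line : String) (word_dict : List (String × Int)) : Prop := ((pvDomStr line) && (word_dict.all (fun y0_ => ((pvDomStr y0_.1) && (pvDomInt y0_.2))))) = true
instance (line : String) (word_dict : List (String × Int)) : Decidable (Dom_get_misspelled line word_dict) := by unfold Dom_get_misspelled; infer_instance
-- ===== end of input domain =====

-- B replaces dict-dedup-then-sort by an online sorted insertion (recursive sorted-insert, no dict, no sort call); alternative decomposition, same order of cost.


-- ===== PORT A =====
-- 'if len(w) > 1 and w not in word_dict: misspelled[w] = 1' over line.split(), then sorted keys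
def get_misspelled (line : String) (word_dict : List (String × Int)) : List String :=
  let misspelled : PySem.Dict String Int :=
    (PySem.Str.split₀ line).foldl
      (fun d w => if 1 < PySem.Str.len w ∧ w ∉ word_dict.map Prod.fst then d.insert w 1 else d)
      PySem.Dict.empty
  PySem.List.sorted misspelled.keys (fun x => x) false

-- ===== PORT B =====
-- recursive sorted-insert: w goes to its ordered position, unchanged if already present
def insertSortedUnique : List String → String → List String
  | [], w => [w]
  | h :: t, w => if h < w then h :: insertSortedUnique t w
                 else if h = w then h :: t else w :: h :: t

def get_misspelled_alt (line : String) (word_dict : List (String × Int)) : List String :=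
  (PySem.Str.split₀ line).foldl
    (fun res w => if 1 < PySem.Str.len w ∧ w ∉ word_dict.map Prod.fst
                  then insertSortedUnique res w else res)
    []

-- ===== PRECONDITION & SPEC =====
def Spec_get_misspelled (line : String) (word_dict : List (String × Int)) (out : List String) : Prop := out = get_misspelled_alt line word_dict
instance (line : String) (word_dict : List (String × Int)) (out : List String) : Decidable (Spec_get_misspelled line word_dict out) := by unfold Spec_get_misspelled; infer_instance

-- ===== CLAIM (what is proved, stated in full; the proofs are below) =====
def Claim_equal_get_misspelled : Prop := ∀ (line : String) (word_dict : List (String × Int)), Dom_get_misspelled line word_dict → Spec_get_misspelled line word_dict (get_misspelled line word_dict)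

-- ===== LEMMAS AND PROOFS =====

theorem mem_insertSortedUnique (res : List String) (w x : String) :
    x ∈ insertSortedUnique res w ↔ x ∈ res ∨ x = w := by
  induction res with
  | nil => simp [insertSortedUnique]
  | cons h t ih =>
    by_cases h1 : h < w
    · simp only [insertSortedUnique, if_pos h1, List.mem_cons, ih]; tauto
    · by_cases h2 : h = w
      · subst h2
        simp only [insertSortedUnique, if_neg h1, List.mem_cons, if_pos]; tauto
      · simp only [insertSortedUnique, if_neg h1, if_neg h2, List.mem_cons]; tauto

theorem pairwise_insertSortedUnique (res : List String) (w : String)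
    (hs : res.Pairwise (· < ·)) : (insertSortedUnique res w).Pairwise (· < ·) := by
  induction res with
  | nil => simp [insertSortedUnique]
  | cons h t ih =>
    have hht : ∀ b ∈ t, h < b := (List.pairwise_cons.mp hs).1
    have ht : t.Pairwise (· < ·) := (List.pairwise_cons.mp hs).2
    by_cases h1 : h < w
    · rw [insertSortedUnique, if_pos h1]
      refine List.pairwise_cons.mpr ⟨?_, ih ht⟩
      intro b hb
      rcases (mem_insertSortedUnique t w b).mp hb with hb | rfl
      · exact hht b hb
      · exact h1
    · by_cases h2 : h = w
      · rw [insertSortedUnique, if_neg h1, if_pos h2]; exact hs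
      · rw [insertSortedUnique, if_neg h1, if_neg h2]
        have hwh : w < h := lt_of_le_of_ne (not_lt.mp h1) (fun e => h2 e.symm)
        refine List.pairwise_cons.mpr ⟨?_, hs⟩
        intro b hb
        rcases List.mem_cons.mp hb with rfl | hb
        · exact hwh
        · exact lt_trans hwh (hht b hb)

theorem foldl_insertSortedUnique (l : List String) : ∀ (acc : List String),
    acc.Pairwise (· < ·) →
      (l.foldl insertSortedUnique acc).Pairwise (· < ·)
      ∧ ∀ x, x ∈ l.foldl insertSortedUnique acc ↔ x ∈ acc ∨ x ∈ l := by
  induction l with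
  | nil => intro acc hacc; simpa using hacc
  | cons w t ih =>
    intro acc hacc
    obtain ⟨h1, h2⟩ := ih (insertSortedUnique acc w) (pairwise_insertSortedUnique acc w hacc)
    refine ⟨h1, ?_⟩
    intro x
    rw [List.foldl_cons] at *
    rw [h2 x, mem_insertSortedUnique]
    simp only [List.mem_cons]; tauto

-- ===== VERDICT (by name: the statement is the Claim_ definition above) =====
theorem get_misspelled_spec : Claim_equal_get_misspelled := by
  intro line word_dict _
  simp only [Spec_get_misspelled, get_misspelled, get_misspelled_alt]
  set bad := (PySem.Str.split₀ line).filter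
      (fun w => decide (1 < PySem.Str.len w ∧ w ∉ word_dict.map Prod.fst)) with hbad
  -- A's loop builds a dict whose keys are set(bad) in first-occurrence order
  have hkeys :
      ((PySem.Str.split₀ line).foldl
        (fun d w => if 1 < PySem.Str.len w ∧ w ∉ word_dict.map Prod.fst then d.insert w 1 else d)
        (PySem.Dict.empty : PySem.Dict String Int)).keys = PySem.Set.ofList bad := by
    rw [PySem.List.foldl_ite_eq_foldl_filter, hbad]
    rw [PySem.Dict.keys_foldl_insert (f := fun _ _ => (1 : Int))]
    simp [PySem.Set.update, PySem.Set.ofList_eq_foldl, PySem.Dict.keys, PySem.Dict.empty]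
  rw [hkeys]
  -- B's loop is foldl insertSortedUnique [] over the filtered words
  have hB : (PySem.Str.split₀ line).foldl
      (fun res w => if 1 < PySem.Str.len w ∧ w ∉ word_dict.map Prod.fst
                    then insertSortedUnique res w else res) []
      = bad.foldl insertSortedUnique [] := by
    rw [PySem.List.foldl_ite_eq_foldl_filter, hbad]
  rw [hB]
  obtain ⟨hlt, hmem⟩ := foldl_insertSortedUnique bad [] (by simp)
  refine PySem.List.sorted_eq_of_perm_of_pairwise_lt _ _ _ ?_ hlt
  have hnd : (bad.foldl insertSortedUnique []).Nodup := hlt.imp (fun h => ne_of_lt h)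
  refine (List.perm_ext_iff_of_nodup hnd (PySem.Set.nodup_ofList bad)).mpr ?_
  intro x
  rw [hmem x, PySem.Set.mem_ofList]
  simp
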